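-- pv_equiv track=rewrite | github.com/mazer300/etu | piaa/лаба5/stepic_2.py | findSubPatterns
-- ===== SOURCE A (Python) =====
-- def findSubPatterns(pattern: str, jokerSymbol: str):
--     """Делит шаблон с символом-джокером на отдельные части"""
--     subPatterns = []
--     positions = []
--     current = ""
--     startPosition = 0
--
--     for i, char in enumerate(pattern):
--         if char != jokerSymbol:
--             current += char
--         else:
--             if current:
--                 subPatterns.append(current)
--                 positions.append(startPosition)
--                 current = ""
--             startPosition = i + 1
--
--     if current:
--         subPatterns.append(current)
--         positions.append(startPosition)
--
--     return subPatterns, positions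
-- ===== SOURCE B (Python) =====
-- def findSubPatterns(pattern: str, jokerSymbol: str):
--     """Делит шаблон с символом-джокером на отдельные части"""
--     cuts = [i for i, c in enumerate(pattern) if c == jokerSymbol] + [len(pattern)]
--     subPatterns = []
--     positions = []
--     prev = -1
--     for nxt in cuts:
--         seg = pattern[prev + 1:nxt]
--         if seg:
--             subPatterns.append(seg)
--             positions.append(prev + 1)
--         prev = nxt
--     return subPatterns, positions
-- ===== Notes on version B (the rewrite author's own statement) =====
-- stated objective: alternative
-- what changed: B first collects all joker positions (plus the end index) in one comprehension and then cuts the pattern into slices between consecutive boundaries, instead of A's single char-by-char scan that accumulates the current sub-pattern one character at a time.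
import Mathlib
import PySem

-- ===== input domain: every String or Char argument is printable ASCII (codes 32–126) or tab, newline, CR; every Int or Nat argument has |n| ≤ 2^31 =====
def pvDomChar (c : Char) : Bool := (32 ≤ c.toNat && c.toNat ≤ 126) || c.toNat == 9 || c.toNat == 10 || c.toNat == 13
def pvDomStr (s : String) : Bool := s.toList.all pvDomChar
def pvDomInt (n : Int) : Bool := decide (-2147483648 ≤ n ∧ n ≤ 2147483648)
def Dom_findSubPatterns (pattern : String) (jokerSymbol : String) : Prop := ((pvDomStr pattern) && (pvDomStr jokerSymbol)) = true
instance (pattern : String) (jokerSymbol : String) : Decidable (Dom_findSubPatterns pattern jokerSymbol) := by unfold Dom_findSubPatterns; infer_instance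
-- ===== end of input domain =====

-- B collects the joker boundary indices first and slices the pattern between consecutive
-- boundaries; A scans char by char accumulating the current sub-pattern ("alternative").

-- ===== PORT A =====
-- loop body of A's `for i, char in enumerate(pattern)`; state = (subPatterns, positions, current, startPosition)
def stepA (jokerSymbol : String) (st : List String × List Int × List Char × Int)
    (ic : Int × Char) : List String × List Int × List Char × Int :=
  if String.ofList [ic.2] ≠ jokerSymbol then
    (st.1, st.2.1, st.2.2.1 ++ [ic.2], st.2.2.2)
  else if st.2.2.1 ≠ [] then
    (st.1 ++ [String.ofList st.2.2.1], st.2.1 ++ [st.2.2.2], [], ic.1 + 1)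
  else
    (st.1, st.2.1, [], ic.1 + 1)

-- A's trailing `if current:` after the loop
def finishA (st : List String × List Int × List Char × Int) : List String × List Int :=
  if st.2.2.1 ≠ [] then (st.1 ++ [String.ofList st.2.2.1], st.2.1 ++ [st.2.2.2])
  else (st.1, st.2.1)

def findSubPatterns (pattern : String) (jokerSymbol : String) : List String × List Int :=
  finishA ((PySem.List.enumerate pattern.toList 0).foldl (stepA jokerSymbol) ([], [], [], 0))

-- ===== PORT B =====
-- loop body of B's `for nxt in cuts`; state = (subPatterns, positions, prev)
def stepB (cs : List Char) (st : List String × List Int × Int) (nxt : Int) :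
    List String × List Int × Int :=
  let seg := PySem.List.slice cs (some (st.2.2 + 1)) (some nxt)
  if seg ≠ [] then (st.1 ++ [String.ofList seg], st.2.1 ++ [st.2.2 + 1], nxt)
  else (st.1, st.2.1, nxt)

def findSubPatterns_alt (pattern : String) (jokerSymbol : String) : List String × List Int :=
  let cs := pattern.toList
  -- cuts = [i for i, c in enumerate(pattern) if c == jokerSymbol] + [len(pattern)]
  let cuts := ((PySem.List.enumerate cs 0).filter
      (fun ic => String.ofList [ic.2] == jokerSymbol)).map (·.1) ++ [(cs.length : Int)]
  let st := cuts.foldl (stepB cs) ([], [], -1)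
  (st.1, st.2.1)

-- ===== PRECONDITION & SPEC =====
def Spec_findSubPatterns (pattern : String) (jokerSymbol : String) (out : List String × List Int) : Prop := out = findSubPatterns_alt pattern jokerSymbol
instance (pattern : String) (jokerSymbol : String) (out : List String × List Int) : Decidable (Spec_findSubPatterns pattern jokerSymbol out) := by unfold Spec_findSubPatterns; infer_instance

-- ===== CLAIM (what is proved, stated in full; the proofs are below) =====
def Claim_equal_findSubPatterns : Prop := ∀ (pattern : String) (jokerSymbol : String), Dom_findSubPatterns pattern jokerSymbol → Spec_findSubPatterns pattern jokerSymbol (findSubPatterns pattern jokerSymbol)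

-- ===== LEMMAS AND PROOFS =====

-- Reference function: the sub-patterns of `cs` (which sits at absolute index k of the pattern),
-- with pending segment `cur` that started at position `sp`.
def F (j : String) : List Char → Int → List Char → Int → List String × List Int
  | [], _, cur, sp => if cur ≠ [] then ([String.ofList cur], [sp]) else ([], [])
  | c :: cs, k, cur, sp =>
    if String.ofList [c] ≠ j then F j cs (k + 1) (cur ++ [c]) sp
    else if cur ≠ [] then
      let r := F j cs (k + 1) [] (k + 1)
      (String.ofList cur :: r.1, sp :: r.2)
    else F j cs (k + 1) [] (k + 1)

-- B's loop, recursively over the cut list.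
def G (cs : List Char) : Int → List Int → List String × List Int
  | _, [] => ([], [])
  | prev, nxt :: rest =>
    let seg := PySem.List.slice cs (some (prev + 1)) (some nxt)
    let r := G cs nxt rest
    if seg ≠ [] then (String.ofList seg :: r.1, (prev + 1) :: r.2) else r

def jokIdx (j : String) (cs : List Char) (k : Int) : List Int :=
  ((PySem.List.enumerate cs k).filter (fun ic => String.ofList [ic.2] == j)).map (·.1)

lemma A_fold (j : String) : ∀ (cs : List Char) (k : Int) (subs : List String)
    (poss : List Int) (cur : List Char) (sp : Int),
    finishA (List.foldl (stepA j) (subs, poss, cur, sp) (PySem.List.enumerate cs k))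
      = (subs ++ (F j cs k cur sp).1, poss ++ (F j cs k cur sp).2) := by
  intro cs
  induction cs with
  | nil =>
    intro k subs poss cur sp
    simp only [PySem.List.enumerate_nil, List.foldl_nil, finishA, F]
    split_ifs <;> simp
  | cons c cs ih =>
    intro k subs poss cur sp
    rw [PySem.List.enumerate_cons, List.foldl_cons]
    by_cases h : String.ofList [c] = j
    · by_cases hc : cur = []
      · subst hc
        simp [stepA, h, F, ih]
      · simp [stepA, h, hc, F, ih]
    · simp [stepA, h, F, ih]

lemma B_fold (cs : List Char) : ∀ (cuts : List Int) (subs : List String)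
    (poss : List Int) (prev : Int),
    ((List.foldl (stepB cs) (subs, poss, prev) cuts).1,
     (List.foldl (stepB cs) (subs, poss, prev) cuts).2.1)
      = (subs ++ (G cs prev cuts).1, poss ++ (G cs prev cuts).2) := by
  intro cuts
  induction cuts with
  | nil => intro subs poss prev; simp [G]
  | cons nxt rest ih =>
    intro subs poss prev
    rw [List.foldl_cons]
    by_cases h : PySem.List.slice cs (some (prev + 1)) (some nxt) = []
    · simp [stepB, h, G, ih]
    · simp [stepB, h, G, ih]

lemma jokIdx_nil (j : String) (k : Int) : jokIdx j [] k = [] := by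
  simp [jokIdx, PySem.List.enumerate_nil]

lemma jokIdx_cons (j : String) (c : Char) (cs : List Char) (k : Int) :
    jokIdx j (c :: cs) k
      = if String.ofList [c] = j then k :: jokIdx j cs (k + 1) else jokIdx j cs (k + 1) := by
  by_cases h : String.ofList [c] = j <;>
    simp [jokIdx, PySem.List.enumerate_cons, h]

lemma key (j : String) (cs : List Char) : ∀ (suf : List Char) (k sp : Nat), sp ≤ k →
    cs.drop k = suf →
    G cs ((sp : Int) - 1) (jokIdx j suf k ++ [(k : Int) + suf.length])
      = F j suf k ((cs.drop sp).take (k - sp)) sp := by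
  intro suf
  induction suf with
  | nil =>
    intro k sp hsp hdrop
    have h1 : (sp : Int) - 1 + 1 = ((sp : Nat) : Int) := by ring
    simp only [jokIdx_nil, List.nil_append, List.length_nil, Nat.cast_zero, add_zero, G, h1,
      PySem.List.slice_natCast, F]
  | cons c suf ih =>
    intro k sp hsp hdrop
    have hdrop' : cs.drop (k + 1) = suf := by
      rw [← List.tail_drop, hdrop]
      rfl
    have h0 : cs[k]? = some c := by
      have h00 : (cs.drop k)[0]? = some c := by rw [hdrop]; rfl
      rw [List.getElem?_drop] at h00
      simpa using h00
    have hget : (cs.drop sp)[k - sp]? = some c := by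
      rw [List.getElem?_drop, show sp + (k - sp) = k from by omega]
      exact h0
    have hpend : (cs.drop sp).take (k + 1 - sp) = (cs.drop sp).take (k - sp) ++ [c] := by
      rw [show k + 1 - sp = (k - sp) + 1 from by omega, List.take_add_one, hget]
      rfl
    have h1 : (sp : Int) - 1 + 1 = ((sp : Nat) : Int) := by ring
    have e1 : (k : Int) + 1 = ((k + 1 : Nat) : Int) := by push_cast; ring
    have e2 : (k : Int) + ((c :: suf).length : Int) = ((k + 1 : Nat) : Int) + (suf.length : Int) := by
      push_cast [List.length_cons]; ring
    by_cases hj : String.ofList [c] = j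
    · -- joker char: a cut here
      have e3 : ((k + 1 : Nat) : Int) - 1 = (k : Int) := by push_cast; ring
      have hIH := ih (k + 1) (k + 1) (le_refl _) hdrop'
      rw [e3] at hIH
      simp only [Nat.sub_self, List.take_zero] at hIH
      rw [jokIdx_cons, if_pos hj, List.cons_append]
      simp only [G, h1, e1, e2, hIH, PySem.List.slice_natCast, F]
      rw [if_neg (not_not_intro hj)]
    · -- ordinary char
      rw [jokIdx_cons, if_neg hj, e1, e2, ih (k + 1) sp (by omega) hdrop', hpend]
      conv_rhs => simp only [F]
      rw [if_pos hj, e1]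

-- ===== VERDICT (by name: the statement is the Claim_ definition above) =====
theorem findSubPatterns_spec : Claim_equal_findSubPatterns := by
  intro pattern jokerSymbol _
  have hK := key jokerSymbol pattern.toList pattern.toList 0 0 (le_refl 0) (by simp)
  simp only [Nat.cast_zero, zero_sub, zero_add, Nat.sub_self, List.take_zero] at hK
  unfold Spec_findSubPatterns findSubPatterns findSubPatterns_alt
  rw [A_fold]
  show _ = (((jokIdx jokerSymbol pattern.toList 0 ++ [(pattern.toList.length : Int)]).foldl
      (stepB pattern.toList) ([], [], -1)).1,
    ((jokIdx jokerSymbol pattern.toList 0 ++ [(pattern.toList.length : Int)]).foldl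
      (stepB pattern.toList) ([], [], -1)).2.1)
  rw [B_fold, hK]
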